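-- pv_equiv track=rewrite | github.com/Anluongk25/Python-DataLemur | base13.py | to_base_13
-- ===== SOURCE A (Python) =====
-- def to_base_13(num):
--     if num == 0:
--         return "0"
--
--     digits = "0123456789ABC"
--     result = ""
--     is_negative = num < 0
--     num = abs(num)
--
--     while num > 0:
--         remainder = num % 13
--         result = digits[remainder] + result
--         num //= 13
--
--     return "-" + result if is_negative else result
-- ===== SOURCE B (Python) =====
-- def to_base_13(num):
--     digits = "0123456789ABC"
--     if num < 0:
--         return "-" + to_base_13(-num)
--     if num < 13:
--         return digits[num]
--     return to_base_13(num // 13) + digits[num % 13]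
-- ===== Notes on version B (the rewrite author's own statement) =====
-- stated objective: simpler
-- what changed: Replaced the while loop with accumulator, sign flag and explicit zero special-case by a short recursive function on the quotient whose single-digit base case also covers zero.
import Mathlib
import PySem

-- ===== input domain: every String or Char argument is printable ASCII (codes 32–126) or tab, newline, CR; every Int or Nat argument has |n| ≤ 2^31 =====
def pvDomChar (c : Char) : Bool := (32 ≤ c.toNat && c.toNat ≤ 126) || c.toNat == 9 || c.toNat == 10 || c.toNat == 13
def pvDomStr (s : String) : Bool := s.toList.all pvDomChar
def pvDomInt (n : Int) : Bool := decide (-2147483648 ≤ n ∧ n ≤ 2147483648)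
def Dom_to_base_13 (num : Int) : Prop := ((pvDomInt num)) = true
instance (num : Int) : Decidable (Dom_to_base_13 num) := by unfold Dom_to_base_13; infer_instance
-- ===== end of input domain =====

-- B replaces A's while loop, accumulator, sign flag and zero special-case by a short recursion on num // 13 (objective: simpler).

-- ===== PORT A =====
-- digits[r]: Python indexing "0123456789ABC"[r]; exact for 0 ≤ r < 13, the only indices reached
def pvDig (r : Nat) : String :=
  String.ofList [("0123456789ABC".toList.getD r '?')]

-- the while loop: result = digits[num % 13] + result; num //= 13
def pvLoopA (n : Nat) (result : String) : String :=
  if _h : 0 < n then pvLoopA (n / 13) (pvDig (n % 13) ++ result) else result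
decreasing_by exact Nat.div_lt_self _h (by norm_num)

def to_base_13 (num : Int) : String :=
  if num == 0 then "0"
  else
    let isNeg := num < 0
    let r := pvLoopA num.natAbs ""
    if isNeg then "-" ++ r else r

-- ===== PORT B =====
-- the nonnegative recursion of Source B (num < 13 base case; else recurse on num // 13)
def pvRecB (n : Nat) : String :=
  if _h : n < 13 then pvDig n else pvRecB (n / 13) ++ pvDig (n % 13)
decreasing_by exact Nat.div_lt_self (by omega) (by norm_num)

def to_base_13_alt (num : Int) : String :=
  if num < 0 then "-" ++ pvRecB (-num).natAbs else pvRecB num.natAbs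

-- ===== PRECONDITION & SPEC =====
def Spec_to_base_13 (num : Int) (out : String) : Prop := out = to_base_13_alt num
instance (num : Int) (out : String) : Decidable (Spec_to_base_13 num out) := by unfold Spec_to_base_13; infer_instance

-- ===== CLAIM (what is proved, stated in full; the proofs are below) =====
def Claim_equal_to_base_13 : Prop := ∀ (num : Int), Dom_to_base_13 num → Spec_to_base_13 num (to_base_13 num)

-- ===== LEMMAS AND PROOFS =====
theorem pvLoopA_eq_recB (n : Nat) (hn : 0 < n) (s : String) :
    pvLoopA n s = pvRecB n ++ s := by
  induction n using Nat.strong_induction_on generalizing s with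
  | _ n ih =>
    rw [pvLoopA, dif_pos hn, pvRecB]
    by_cases h13 : n < 13
    · have h0 : n / 13 = 0 := Nat.div_eq_of_lt h13
      have hm : n % 13 = n := Nat.mod_eq_of_lt h13
      rw [dif_pos h13, h0, hm, pvLoopA]
      simp
    · have hq : 0 < n / 13 := Nat.div_pos (by omega) (by norm_num)
      rw [ih (n / 13) (Nat.div_lt_self hn (by norm_num)) hq, dif_neg h13,
        String.append_assoc]

-- ===== VERDICT (by name: the statement is the Claim_ definition above) =====

theorem to_base_13_spec : Claim_equal_to_base_13 := by
  intro num _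
  unfold Spec_to_base_13 to_base_13 to_base_13_alt
  by_cases h0 : num = 0
  · subst h0
    simp only [BEq.rfl, if_true, Int.natAbs_zero]
    rw [if_neg (by omega), pvRecB]
    simp [pvDig]
  · rw [if_neg (by simpa using h0)]
    have habs : 0 < num.natAbs := Int.natAbs_pos.mpr h0
    by_cases hneg : num < 0
    · rw [if_pos hneg, if_pos hneg,
        pvLoopA_eq_recB num.natAbs habs ""]
      have : (-num).natAbs = num.natAbs := Int.natAbs_neg num
      rw [this]
      simp
    · rw [if_neg hneg, if_neg hneg, pvLoopA_eq_recB num.natAbs habs ""]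
      simp
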